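-- pv_equiv track=rewrite | github.com/JojhanPerezArroyave/taller1Algoritmos | main.py | marginalizar_columna
-- ===== SOURCE A (Python) =====
-- def marginalizar_columna(diccionario, indice):
--     nuevo_diccionario = {}
--
--     for clave, valores in diccionario.items():
--         nueva_clave = clave[:indice] + clave[indice + 1:]
--         if nueva_clave in nuevo_diccionario:
--             nuevo_diccionario[nueva_clave] = [sum(x) for x in zip(nuevo_diccionario[nueva_clave], valores)]
--         else:
--             nuevo_diccionario[nueva_clave] = valores
--
--     return nuevo_diccionario
-- ===== SOURCE B (Python) =====
-- def marginalizar_columna(diccionario, indice):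
--     grupos = {}
--     for clave, valores in diccionario.items():
--         nueva_clave = clave[:indice] + clave[indice + 1:]
--         grupos.setdefault(nueva_clave, []).append(valores)
--     return {clave: [sum(col) for col in zip(*listas)] for clave, listas in grupos.items()}
-- ===== Notes on version B (the rewrite author's own statement) =====
-- stated objective: alternative
-- what changed: A folds each row into the result dict with an online pairwise zip-sum; B first groups all value-lists per reduced key in one pass, then in a second pass sums the columns of each group via a zip(*lists) transpose.
import Mathlib
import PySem

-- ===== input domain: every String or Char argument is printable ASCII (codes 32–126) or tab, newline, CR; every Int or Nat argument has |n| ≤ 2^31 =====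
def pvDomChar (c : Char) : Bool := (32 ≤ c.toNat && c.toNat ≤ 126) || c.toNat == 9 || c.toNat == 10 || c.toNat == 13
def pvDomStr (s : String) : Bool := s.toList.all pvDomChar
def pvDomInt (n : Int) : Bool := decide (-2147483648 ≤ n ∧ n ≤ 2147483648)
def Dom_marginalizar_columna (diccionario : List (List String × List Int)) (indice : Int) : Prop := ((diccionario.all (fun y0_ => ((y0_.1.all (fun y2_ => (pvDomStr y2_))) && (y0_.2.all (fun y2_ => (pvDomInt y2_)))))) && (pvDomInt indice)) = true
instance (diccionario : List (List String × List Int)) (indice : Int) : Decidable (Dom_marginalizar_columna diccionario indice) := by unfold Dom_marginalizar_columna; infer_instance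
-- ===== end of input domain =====

-- B groups all value-lists per reduced key in one pass, then sums columns per group
-- (zip(*lists) transpose) in a second pass, replacing A's online pairwise accumulator.

-- ===== PORT A =====
def marginalizar_columna (diccionario : List (List String × List Int)) (indice : Int) : List (List String × List Int) :=
  (diccionario.foldl (fun nuevo_diccionario kv =>
      let nueva_clave := PySem.List.slice kv.1 none (some indice) ++ PySem.List.slice kv.1 (some (indice + 1)) none
      if nuevo_diccionario.contains nueva_clave then
        nuevo_diccionario.insert nueva_clave
          (((nuevo_diccionario.getD nueva_clave []).zip kv.2).map (fun x => x.1 + x.2))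
      else
        nuevo_diccionario.insert nueva_clave kv.2)
    PySem.Dict.empty).items

-- ===== PORT B =====
-- zip(*listas): columns, stopping at the shortest list (fuel = length of the first list)
def pyZipStarGo : Nat → List (List Int) → List (List Int)
  | 0, _ => []
  | n + 1, ls =>
    if ls.any List.isEmpty then []
    else ls.map (fun l => l.headD 0) :: pyZipStarGo n (ls.map List.tail)

def pyZipStar : List (List Int) → List (List Int)
  | [] => []
  | l0 :: rest => pyZipStarGo l0.length (l0 :: rest)

def marginalizar_columna_alt (diccionario : List (List String × List Int)) (indice : Int) : List (List String × List Int) :=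
  let grupos := diccionario.foldl (fun g kv =>
      let nueva_clave := PySem.List.slice kv.1 none (some indice) ++ PySem.List.slice kv.1 (some (indice + 1)) none
      g.modify nueva_clave [] (· ++ [kv.2]))
    PySem.Dict.empty
  grupos.items.map (fun p => (p.1, (pyZipStar p.2).map List.sum))

-- ===== PRECONDITION & SPEC =====
def Spec_marginalizar_columna (diccionario : List (List String × List Int)) (indice : Int) (out : List (List String × List Int)) : Prop := out = marginalizar_columna_alt diccionario indice
instance (diccionario : List (List String × List Int)) (indice : Int) (out : List (List String × List Int)) : Decidable (Spec_marginalizar_columna diccionario indice out) := by unfold Spec_marginalizar_columna; infer_instance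

-- ===== CLAIM (what is proved, stated in full; the proofs are below) =====
def Claim_equal_marginalizar_columna : Prop := ∀ (diccionario : List (List String × List Int)) (indice : Int), Dom_marginalizar_columna diccionario indice → Spec_marginalizar_columna diccionario indice (marginalizar_columna diccionario indice)

-- ===== LEMMAS AND PROOFS =====
-- column sums of a group (what B's second pass computes per key)
def pvColS (ls : List (List Int)) : List Int := (pyZipStar ls).map List.sum

-- B's group dict mapped through pvColS: the value A's dict holds at each key
def pvPhi (g : PySem.Dict (List String) (List (List Int))) : PySem.Dict (List String) (List Int) :=
  ⟨g.items.map (fun p => (p.1, pvColS p.2))⟩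

theorem pvGo_snoc (n : Nat) : ∀ (ls : List (List Int)) (v : List Int),
    pyZipStarGo n (ls ++ [v]) = ((pyZipStarGo n ls).zip v).map (fun p => p.1 ++ [p.2]) := by
  induction n with
  | zero => intro ls v; simp [pyZipStarGo]
  | succ n ih =>
    intro ls v
    by_cases hls : ls.any List.isEmpty
    · simp [pyZipStarGo, hls]
    · cases v with
      | nil => simp [pyZipStarGo, hls]
      | cons y ys =>
        have h2 : ((ls ++ [y :: ys]).any List.isEmpty) = false := by
          simp only [List.any_append, Bool.or_eq_false_iff]
          constructor
          · exact Bool.not_eq_true _ |>.mp hls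
          · simp
        simp only [pyZipStarGo, h2, hls, Bool.false_eq_true, if_false]
        simp only [List.map_append, List.map_cons, List.map_nil]
        rw [ih]
        simp [List.zip_cons_cons]

theorem pvGo_single : ∀ (v : List Int), pyZipStarGo v.length [v] = v.map (fun x => [x]) := by
  intro v
  induction v with
  | nil => simp [pyZipStarGo]
  | cons x xs ih => simp [pyZipStarGo, ih]

theorem pvColS_singleton (v : List Int) : pvColS [v] = v := by
  simp only [pvColS, pyZipStar, pvGo_single, List.map_map]
  have : (List.sum ∘ fun x : Int => [x]) = fun x => x := by funext x; simp
  rw [this, List.map_id']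

theorem pvColS_snoc (ls : List (List Int)) (v : List Int) (h : ls ≠ []) :
    pvColS (ls ++ [v]) = ((pvColS ls).zip v).map (fun p => p.1 + p.2) := by
  obtain ⟨l0, rest, rfl⟩ := List.exists_cons_of_ne_nil h
  have hz : pyZipStar ((l0 :: rest) ++ [v])
      = ((pyZipStar (l0 :: rest)).zip v).map (fun p => p.1 ++ [p.2]) := by
    show pyZipStarGo l0.length ((l0 :: rest) ++ [v]) = _
    rw [pvGo_snoc]
    rfl
  simp only [pvColS, hz, List.map_map]
  rw [List.zip_map_left, List.map_map]
  apply List.map_congr_left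
  intro p _
  simp [Prod.map]

theorem pvModify_eq (g : PySem.Dict (List String) (List (List Int))) (nk : List String)
    (v : List Int) : g.modify nk [] (· ++ [v]) = g.insert nk (g.getD nk [] ++ [v]) := rfl

theorem pvGet?_map (ps : List (List String × List (List Int))) (k : List String) :
    (PySem.Dict.mk (ps.map (fun p => (p.1, pvColS p.2)))).get? k
      = ((PySem.Dict.mk ps).get? k).map pvColS := by
  induction ps with
  | nil => simp [PySem.Dict.get?]
  | cons p ps ih =>
    simp only [List.map_cons]
    rw [PySem.Dict.get?_mk_cons, PySem.Dict.get?_mk_cons]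
    by_cases hk : (p.1 == k) = true
    · rw [if_pos hk, if_pos hk]; rfl
    · rw [if_neg hk, if_neg hk]; exact ih

theorem pvContains_phi (g : PySem.Dict (List String) (List (List Int))) (k : List String) :
    (pvPhi g).contains k = g.contains k := by
  obtain ⟨ps⟩ := g
  simp only [pvPhi, PySem.Dict.contains_mk, List.any_map]
  rfl

theorem pvGet?_phi (g : PySem.Dict (List String) (List (List Int))) (k : List String) :
    (pvPhi g).get? k = (g.get? k).map pvColS := by
  obtain ⟨ps⟩ := g
  exact pvGet?_map ps k

theorem pvStep (g : PySem.Dict (List String) (List (List Int))) (nk : List String) (v : List Int)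
    (hg : ∀ p ∈ g.items, p.2 ≠ []) :
    (if (pvPhi g).contains nk then
        (pvPhi g).insert nk ((((pvPhi g).getD nk []).zip v).map (fun x => x.1 + x.2))
      else (pvPhi g).insert nk v)
      = pvPhi (g.modify nk [] (· ++ [v])) := by
  rw [pvModify_eq]
  by_cases hc : g.contains nk = true
  · have hc' : (pvPhi g).contains nk = true := by rw [pvContains_phi]; exact hc
    obtain ⟨ls, hls⟩ : ∃ ls, g.get? nk = some ls := by
      rw [PySem.Dict.contains_eq_isSome_get?] at hc
      exact Option.isSome_iff_exists.mp hc
    have hne : ls ≠ [] := hg _ (PySem.Dict.mem_items_of_get?_eq_some g hls)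
    have hgd : g.getD nk [] = ls := PySem.Dict.getD_of_get?_eq_some g [] hls
    have hphigd : (pvPhi g).getD nk [] = pvColS ls := by
      apply PySem.Dict.getD_of_get?_eq_some _ []
      rw [pvGet?_phi, hls]
      rfl
    rw [if_pos hc']
    apply PySem.Dict.ext
    rw [PySem.Dict.items_insert_of_contains _ _ hc']
    show _ = (PySem.Dict.mk ((g.insert nk (g.getD nk [] ++ [v])).items.map
      (fun p => (p.1, pvColS p.2)))).items
    rw [hgd, PySem.Dict.items_insert_of_contains _ _ hc]
    show List.map _ (g.items.map (fun p => (p.1, pvColS p.2))) = _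
    rw [List.map_map, List.map_map]
    apply List.map_congr_left
    intro p _
    by_cases hpk : (p.1 == nk) = true
    · simp only [Function.comp, hpk, if_pos, hphigd]
      rw [← pvColS_snoc ls v hne]
    · simp only [Function.comp, hpk, Bool.false_eq_true, if_false]
  · have hcf : g.contains nk = false := Bool.not_eq_true _ |>.mp hc
    have hc' : (pvPhi g).contains nk = false := by rw [pvContains_phi]; exact hcf
    rw [if_neg (by simp [hc'])]
    apply PySem.Dict.ext
    rw [PySem.Dict.items_insert_of_not_contains _ _ hc']
    show _ = (PySem.Dict.mk ((g.insert nk (g.getD nk [] ++ [v])).items.map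
      (fun p => (p.1, pvColS p.2)))).items
    rw [PySem.Dict.getD_of_not_contains g [] hcf, PySem.Dict.items_insert_of_not_contains _ _ hcf]
    show (g.items.map (fun p => (p.1, pvColS p.2))) ++ [(nk, v)] = _
    rw [List.map_append]
    simp [pvColS_singleton]

theorem pvInv (g : PySem.Dict (List String) (List (List Int))) (nk : List String) (v : List Int)
    (hg : ∀ p ∈ g.items, p.2 ≠ []) :
    ∀ p ∈ (g.modify nk [] (· ++ [v])).items, p.2 ≠ [] := by
  rw [pvModify_eq]
  intro p hp
  rcases (PySem.Dict.mem_items_insert _ _ _ _).mp hp with h | h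
  · subst h; simp
  · exact hg _ h.1

theorem pvMain (l : List (List String × List Int)) (indice : Int)
    (g : PySem.Dict (List String) (List (List Int))) (hg : ∀ p ∈ g.items, p.2 ≠ []) :
    l.foldl (fun nuevo_diccionario kv =>
      let nueva_clave := PySem.List.slice kv.1 none (some indice) ++ PySem.List.slice kv.1 (some (indice + 1)) none
      if nuevo_diccionario.contains nueva_clave then
        nuevo_diccionario.insert nueva_clave
          (((nuevo_diccionario.getD nueva_clave []).zip kv.2).map (fun x => x.1 + x.2))
      else
        nuevo_diccionario.insert nueva_clave kv.2) (pvPhi g)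
    = pvPhi (l.foldl (fun g kv =>
        let nueva_clave := PySem.List.slice kv.1 none (some indice) ++ PySem.List.slice kv.1 (some (indice + 1)) none
        g.modify nueva_clave [] (· ++ [kv.2])) g) := by
  induction l generalizing g with
  | nil => rfl
  | cons kv l ih =>
    simp only [List.foldl_cons]
    rw [pvStep g _ kv.2 hg]
    exact ih _ (pvInv g _ kv.2 hg)

-- ===== VERDICT (by name: the statement is the Claim_ definition above) =====
theorem marginalizar_columna_spec : Claim_equal_marginalizar_columna := by
  intro d i _
  unfold Spec_marginalizar_columna marginalizar_columna marginalizar_columna_alt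
  have h := pvMain d i PySem.Dict.empty (by intro p hp; simp [PySem.Dict.empty] at hp)
  have he : pvPhi PySem.Dict.empty = PySem.Dict.empty := rfl
  rw [he] at h
  rw [h]
  rfl
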